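-- pv_equiv track=rewrite | github.com/src-d/style-analyzer | lookout/style/format/research/common.py | _token_to_seq
-- ===== SOURCE A (Python) =====
-- from typing import Iterable, List
--
-- def _token_to_seq(token, to_check: Iterable[str]):
--     if not token:
--         return
--     for check in to_check:
--         pos = token.find(check)
--         if pos != -1:
--             left = token[:pos]
--             center = token[pos:pos + len(check)]
--             right = token[pos + len(check):]
--
--             assert center == check, "%s != %s" % (center, check)
--             report = (
--                 "Something wrong: token `%s`, left `%s`, center `%s`, right `%s`, check `%s`."
--                 % (token, left, center, right, check)
--             )
--             assert left + center + right == token, report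
--
--             yield from _token_to_seq(left, to_check)
--             yield center
--             yield from _token_to_seq(right, to_check)
--             break
-- ===== SOURCE B (Python) =====
-- def _token_to_seq(token, to_check):
--     # Iterative re-implementation: explicit stack of (is_emit, string) work items
--     # replacing A's recursive generator; same left-center-right preorder.
--     stack = [(False, token)]
--     while stack:
--         is_emit, s = stack.pop()
--         if is_emit:
--             yield s
--             continue
--         if not s:
--             continue
--         for check in to_check:
--             pos = s.find(check)
--             if pos != -1:
--                 stack.append((False, s[pos + len(check):]))
--                 stack.append((True, s[pos:pos + len(check)]))
--                 stack.append((False, s[:pos]))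
--                 break
-- ===== Notes on version B (the rewrite author's own statement) =====
-- stated objective: alternative
-- what changed: The recursive generator is replaced by an iterative loop over an explicit stack of emit/process work items, pushed right-center-left so the exact left-center-right preorder is reproduced; Pre_ excludes non-empty tokens with the empty string among the checks, where A in general recurses forever (RecursionError) and B diverges too.
-- outside the precondition, e.g. on _token_to_seq('aa', ['a', '']): A returns ['a', 'a'], B returns ['a', 'a']
import Mathlib
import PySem

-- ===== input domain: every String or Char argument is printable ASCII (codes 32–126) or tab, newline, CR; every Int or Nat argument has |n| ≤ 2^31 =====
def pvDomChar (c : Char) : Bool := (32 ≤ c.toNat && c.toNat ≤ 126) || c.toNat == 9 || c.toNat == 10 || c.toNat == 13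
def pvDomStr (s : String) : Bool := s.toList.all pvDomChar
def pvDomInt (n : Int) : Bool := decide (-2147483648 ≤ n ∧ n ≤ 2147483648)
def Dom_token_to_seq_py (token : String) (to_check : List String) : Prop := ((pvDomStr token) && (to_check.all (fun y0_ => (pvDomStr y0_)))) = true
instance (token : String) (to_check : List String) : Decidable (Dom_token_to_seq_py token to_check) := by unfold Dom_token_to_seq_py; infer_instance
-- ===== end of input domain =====

-- B differs from A only in control structure (explicit stack vs recursion); the proved
-- equivalence is about the returned sequence (both Pythons are generators, compared as lists).

-- ===== PORT A =====
-- the `for check in to_check: pos = token.find(check); if pos != -1: … break` scan,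
-- shared verbatim by both Pythons: first check found in token, with its position
def pvFirstFind (t : List Char) : List String → Option (List Char × Int)
  | [] => none
  | c :: cs =>
    let pos := PySem.Chars.find t c.toList
    if pos = -1 then pvFirstFind t cs else some (c.toList, pos)

-- A's recursive generator; fuel (= token length + 1) only makes the recursion total:
-- inside Pre_ every recursive call strictly shortens the token, so fuel never runs out
def pvGoA : Nat → List Char → List String → List String
  | 0, _, _ => []
  | f + 1, t, tc =>
    if t.isEmpty then [] else
    match pvFirstFind t tc with
    | none => []
    | some (check, pos) =>
      let left := PySem.List.slice t none (some pos)
      let center := PySem.List.slice t (some pos) (some (pos + (check.length : Int)))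
      let right := PySem.List.slice t (some (pos + (check.length : Int))) none
      pvGoA f left tc ++ [String.ofList center] ++ pvGoA f right tc

def token_to_seq_py (token : String) (to_check : List String) : List String :=
  pvGoA (token.toList.length + 1) token.toList to_check

-- ===== PORT B =====
-- a work item of B's explicit stack: emit a piece, or process a (sub)token
inductive PvItem : Type where
  | emit : List Char → PvItem
  | proc : List Char → PvItem
deriving DecidableEq, Repr

-- B's while-loop over the stack; fuel only makes the loop total (see pvGoA's comment)
def pvRunB : Nat → List String → List PvItem → List String
  | 0, _, _ => []
  | _ + 1, _, [] => []
  | f + 1, tc, PvItem.emit s :: rest => String.ofList s :: pvRunB f tc rest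
  | f + 1, tc, PvItem.proc t :: rest =>
    if t.isEmpty then pvRunB f tc rest else
    match pvFirstFind t tc with
    | none => pvRunB f tc rest
    | some (check, pos) =>
      let left := PySem.List.slice t none (some pos)
      let center := PySem.List.slice t (some pos) (some (pos + (check.length : Int)))
      let right := PySem.List.slice t (some (pos + (check.length : Int))) none
      pvRunB f tc (PvItem.proc left :: PvItem.emit center :: PvItem.proc right :: rest)

def token_to_seq_py_alt (token : String) (to_check : List String) : List String :=
  pvRunB (3 * token.toList.length + 1) to_check [PvItem.proc token.toList]

-- ===== PRECONDITION & SPEC =====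
-- Pre_ excludes non-empty tokens with "" among the checks: token.find("") = 0 makes the right
-- piece equal the token, so in general A recurses forever (RecursionError) and B diverges too;
-- on the rare such inputs where an earlier check always matches first, A accidentally still
-- returns and B agrees (see the cite in claim.json).
def Pre_token_to_seq_py (token : String) (to_check : List String) : Prop :=
  token = "" ∨ "" ∉ to_check
instance (token : String) (to_check : List String) : Decidable (Pre_token_to_seq_py token to_check) := by unfold Pre_token_to_seq_py; infer_instance

def pvWitness_token_to_seq_py : String × List String := ("foo.bar_baz", [".", "_", "bar"])

def Spec_token_to_seq_py (token : String) (to_check : List String) (out : List String) : Prop := out = token_to_seq_py_alt token to_check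
instance (token : String) (to_check : List String) (out : List String) : Decidable (Spec_token_to_seq_py token to_check out) := by unfold Spec_token_to_seq_py; infer_instance

-- ===== CLAIM (what is proved, stated in full; the proofs are below) =====
def Claim_equal_token_to_seq_py : Prop := ∀ (token : String) (to_check : List String), Dom_token_to_seq_py token to_check → Pre_token_to_seq_py token to_check → Spec_token_to_seq_py token to_check (token_to_seq_py token to_check)

-- ===== LEMMAS AND PROOFS =====

-- measure of a stack: enough fuel for pvRunB to drain it
def pvMeasure : List PvItem → Nat
  | [] => 0
  | PvItem.emit _ :: rest => 1 + pvMeasure rest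
  | PvItem.proc t :: rest => (3 * t.length + 1) + pvMeasure rest

lemma pvFirstFind_spec (t : List Char) (tc : List String) (hne : "" ∉ tc)
    {check : List Char} {pos : Int} (h : pvFirstFind t tc = some (check, pos)) :
    ∃ k : Nat, pos = (k : Int) ∧ 1 ≤ check.length ∧ k + check.length ≤ t.length := by
  induction tc with
  | nil => simp [pvFirstFind] at h
  | cons c cs ih =>
    simp only [pvFirstFind] at h
    by_cases hf : PySem.Chars.find t c.toList = -1
    · simp only [hf] at h
      exact ih (fun hm => hne (List.mem_cons_of_mem _ hm)) h
    · simp only [if_neg hf, Option.some.injEq, Prod.mk.injEq] at h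
      obtain ⟨hc, hp⟩ := h
      have hne' : PySem.Chars.findFrom t c.toList 0 ≠ -1 := by
        rw [PySem.Chars.findFrom_zero]; exact hf
      obtain ⟨h0, hpre, -⟩ :=
        PySem.Chars.findFrom_natCast_spec t c.toList 0 (Nat.zero_le _)
          (by exact_mod_cast hne')
      simp only [Nat.cast_zero, PySem.Chars.findFrom_zero] at h0 hpre
      rw [hp] at h0 hpre
      have hcs : c ≠ "" := fun hcc => hne (by simp [hcc])
      have hcne : c.toList ≠ [] := fun hl => hcs (String.toList_eq_nil_iff.mp hl)
      have hL : 1 ≤ c.toList.length := List.length_pos_of_ne_nil hcne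
      have hl := hpre.length_le
      rw [List.length_drop] at hl
      refine ⟨pos.toNat, by omega, ?_, ?_⟩ <;> subst hc <;> omega

lemma pvGoA_fuel (tc : List String) (hne : "" ∉ tc) :
    ∀ f t, t.length < f → pvGoA f t tc = pvGoA (t.length + 1) t tc := by
  intro f
  induction f using Nat.strong_induction_on with
  | _ f ih =>
    intro t hf
    match f, hf with
    | f' + 1, hf =>
      simp only [pvGoA]
      cases ht : t.isEmpty with
      | true => simp
      | false =>
        simp only [Bool.false_eq_true, if_false]
        cases hff : pvFirstFind t tc with
        | none => simp
        | some cp =>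
          obtain ⟨check, pos⟩ := cp
          obtain ⟨k, hk, hL, hkl⟩ := pvFirstFind_spec t tc hne hff
          subst hk
          have hcast : (k : Int) + (check.length : Int) = ((k + check.length : Nat) : Int) := by
            push_cast; ring
          simp only [hcast, PySem.List.slice_to_natCast, PySem.List.slice_from_natCast]
          have hlen : 0 < t.length := by
            cases t with
            | nil => simp at ht
            | cons a as => simp
          have hlf : (t.take k).length < t.length := by
            simp [List.length_take]; omega
          have hrg : (t.drop (k + check.length)).length < t.length := by
            simp [List.length_drop]; omega
          rw [ih f' (Nat.lt_succ_self _) (t.take k) (by omega),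
              ih t.length hf (t.take k) hlf,
              ih f' (Nat.lt_succ_self _) (t.drop (k + check.length)) (by omega),
              ih t.length hf (t.drop (k + check.length)) hrg]

lemma pvRunB_spec (tc : List String) (hne : "" ∉ tc) :
    ∀ f stack, pvMeasure stack ≤ f →
      pvRunB f tc stack =
        (stack.map (fun i => match i with
          | PvItem.emit s => [String.ofList s]
          | PvItem.proc t => pvGoA (t.length + 1) t tc)).flatten := by
  intro f
  induction f using Nat.strong_induction_on with
  | _ f ih =>
    intro stack hm
    cases stack with
    | nil => cases f <;> simp [pvRunB]
    | cons item rest =>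
      cases f with
      | zero =>
        exfalso
        cases item <;> simp [pvMeasure] at hm
      | succ f' =>
        cases item with
        | emit s =>
          simp only [pvMeasure] at hm
          simp only [pvRunB, List.map_cons, List.flatten_cons]
          rw [ih f' (Nat.lt_succ_self _) rest (by omega)]
          rfl
        | proc t =>
          simp only [pvMeasure] at hm
          simp only [pvRunB, List.map_cons, List.flatten_cons]
          cases ht : t.isEmpty with
          | true =>
            have htn : t = [] := by cases t <;> simp_all
            subst htn
            rw [ih f' (Nat.lt_succ_self _) rest (by omega)]
            simp [pvGoA]
          | false =>
            simp only [Bool.false_eq_true, if_false]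
            cases hff : pvFirstFind t tc with
            | none =>
              rw [ih f' (Nat.lt_succ_self _) rest (by omega)]
              conv_rhs => rw [pvGoA]
              simp [ht, hff]
            | some cp =>
              obtain ⟨check, pos⟩ := cp
              obtain ⟨k, hk, hL, hkl⟩ := pvFirstFind_spec t tc hne hff
              subst hk
              have hcast : (k : Int) + (check.length : Int) = ((k + check.length : Nat) : Int) := by
                push_cast; ring
              have hlen : 0 < t.length := by cases t <;> simp_all
              have hlf : (t.take k).length = k := by simp [List.length_take]; omega
              have hrg : (t.drop (k + check.length)).length = t.length - (k + check.length) := by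
                simp [List.length_drop]
              dsimp only
              have hstep := ih f' (Nat.lt_succ_self _)
                (PvItem.proc (PySem.List.slice t none (some (k : Int))) ::
                 PvItem.emit (PySem.List.slice t (some (k : Int)) (some ((k : Int) + (check.length : Int)))) ::
                 PvItem.proc (PySem.List.slice t (some ((k : Int) + (check.length : Int))) none) :: rest)
                (by simp only [pvMeasure, hcast, PySem.List.slice_to_natCast,
                      PySem.List.slice_from_natCast, hlf, hrg]
                    omega)
              rw [hstep]
              conv_rhs => rw [pvGoA]
              simp only [ht, Bool.false_eq_true, if_false, hff, hcast,
                PySem.List.slice_to_natCast, PySem.List.slice_from_natCast,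
                List.map_cons, List.flatten_cons]
              rw [pvGoA_fuel tc hne t.length (t.take k) (by omega),
                  pvGoA_fuel tc hne t.length (t.drop (k + check.length)) (by omega)]
              simp [hlf, hrg]

-- ===== VERDICT (by name: the statement is the Claim_ definition above) =====
theorem token_to_seq_py_spec : Claim_equal_token_to_seq_py := by
  intro token tc _ hpre
  unfold Spec_token_to_seq_py token_to_seq_py token_to_seq_py_alt
  rcases hpre with h | hne
  · subst h; rfl
  · rw [pvRunB_spec tc hne (3 * token.toList.length + 1) [PvItem.proc token.toList]
        (by simp [pvMeasure])]
    simp
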